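-- pv_equiv track=rewrite | github.com/rsreyaskrishna/PYTHON | Data_science/sentiment_analysis.py | sentiment_analysis
-- ===== SOURCE A (Python) =====
-- positive_words = [
--     "good", "happy", "joy", "excellent", "fortunate", "correct", "superior",
--     "love", "like", "amazing", "wonderful", "best", "great"
-- ]
--
-- negative_words = [
--     "bad", "sad", "angry", "poor", "unfortunate", "wrong", "inferior",
--     "hate", "dislike", "awful", "terrible", "worst", "horrible"
-- ]
--
-- def sentiment_analysis(text):
--     text = text.lower()
--     words = text.split()
--     score = 0
--
--     for word in words:
--         if word in positive_words:
--             score += 1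
--         elif word in negative_words:
--             score -= 1
--
--     if score > 0:
--         return "Positive"
--     elif score < 0:
--         return "Negative"
--     else:
--         return "Neutral"
-- ===== SOURCE B (Python) =====
-- positive_words = [
--     "good", "happy", "joy", "excellent", "fortunate", "correct", "superior",
--     "love", "like", "amazing", "wonderful", "best", "great"
-- ]
--
-- negative_words = [
--     "bad", "sad", "angry", "poor", "unfortunate", "wrong", "inferior",
--     "hate", "dislike", "awful", "terrible", "worst", "horrible"
-- ]
--
-- def sentiment_analysis(text):
--     counts = {}
--     for w in text.lower().split():
--         counts[w] = counts.get(w, 0) + 1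
--     score = sum(counts.get(w, 0) for w in positive_words) \
--           - sum(counts.get(w, 0) for w in negative_words)
--     if score > 0:
--         return "Positive"
--     if score < 0:
--         return "Negative"
--     return "Neutral"
-- ===== Notes on version B (the rewrite author's own statement) =====
-- stated objective: alternative
-- what changed: B builds a word-frequency dict of the text in one pass and then sums the counts of the fixed positive/negative vocabularies, instead of scanning both vocabulary lists for every word of the text.
import Mathlib
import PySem

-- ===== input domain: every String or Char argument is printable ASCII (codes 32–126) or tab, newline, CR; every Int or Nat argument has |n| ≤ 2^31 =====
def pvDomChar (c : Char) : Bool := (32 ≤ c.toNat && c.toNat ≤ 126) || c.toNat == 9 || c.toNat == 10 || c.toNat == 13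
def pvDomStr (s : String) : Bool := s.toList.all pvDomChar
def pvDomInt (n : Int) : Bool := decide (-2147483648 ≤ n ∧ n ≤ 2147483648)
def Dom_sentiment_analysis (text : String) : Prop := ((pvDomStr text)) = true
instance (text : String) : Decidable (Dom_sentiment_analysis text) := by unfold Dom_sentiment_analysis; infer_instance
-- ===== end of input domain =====

-- B builds a word-frequency dict of the text in one pass and then sums the counts of the fixed
-- positive/negative vocabularies, instead of scanning both vocabularies for every word (alternative).

def pvPos : List String :=
  ["good", "happy", "joy", "excellent", "fortunate", "correct", "superior",
   "love", "like", "amazing", "wonderful", "best", "great"]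

def pvNeg : List String :=
  ["bad", "sad", "angry", "poor", "unfortunate", "wrong", "inferior",
   "hate", "dislike", "awful", "terrible", "worst", "horrible"]

-- ===== PORT A =====
def sentiment_analysis (text : String) : String :=
  let text := PySem.Str.lower text
  let words := PySem.Str.split₀ text
  let score : Int := words.foldl (fun score word =>
    if word ∈ pvPos then score + 1
    else if word ∈ pvNeg then score - 1
    else score) 0
  if score > 0 then "Positive"
  else if score < 0 then "Negative"
  else "Neutral"

-- ===== PORT B =====
def sentiment_analysis_alt (text : String) : String :=
  let counts : PySem.Dict String Int :=
    (PySem.Str.split₀ (PySem.Str.lower text)).foldl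
      (fun d w => d.insert w (d.getD w 0 + 1)) PySem.Dict.empty
  let score : Int :=
    (pvPos.map (fun w => counts.getD w 0)).sum - (pvNeg.map (fun w => counts.getD w 0)).sum
  if score > 0 then "Positive"
  else if score < 0 then "Negative"
  else "Neutral"

-- ===== PRECONDITION & SPEC =====
def Spec_sentiment_analysis (text : String) (out : String) : Prop := out = sentiment_analysis_alt text
instance (text : String) (out : String) : Decidable (Spec_sentiment_analysis text out) := by unfold Spec_sentiment_analysis; infer_instance

-- ===== CLAIM (what is proved, stated in full; the proofs are below) =====
def Claim_equal_sentiment_analysis : Prop := ∀ (text : String), Dom_sentiment_analysis text → Spec_sentiment_analysis text (sentiment_analysis text)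

-- ===== LEMMAS AND PROOFS =====

-- sum over a Nodup vocabulary of counts in (w :: ws) gains 1 exactly when w is in the vocabulary
theorem pv_sum_count_cons (P : List String) (hP : P.Nodup) (w : String) (ws : List String) :
    (P.map (fun p => ((w :: ws).count p : Int))).sum
      = (P.map (fun p => (ws.count p : Int))).sum + (if w ∈ P then 1 else 0) := by
  induction P with
  | nil => simp
  | cons p P ih =>
    simp only [List.nodup_cons] at hP
    simp only [List.map_cons, List.sum_cons, ih hP.2, List.mem_cons]
    by_cases hwp : w = p
    · subst hwp
      have : w ∉ P := hP.1
      rw [List.count_cons_self]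
      simp [this]
      ring
    · rw [List.count_cons_of_ne hwp]
      by_cases hwP : w ∈ P <;> simp [hwp, hwP] <;> ring

theorem pv_pos_not_neg (w : String) (h : w ∈ pvPos) : w ∉ pvNeg := by
  intro h2
  fin_cases h <;> simp [pvNeg] at h2

def pvScore (ws : List String) : Int :=
  (pvPos.map (fun p => (ws.count p : Int))).sum - (pvNeg.map (fun p => (ws.count p : Int))).sum

theorem pv_foldl_eq_score (ws : List String) (acc : Int) :
    ws.foldl (fun score word =>
      if word ∈ pvPos then score + 1
      else if word ∈ pvNeg then score - 1
      else score) acc = acc + pvScore ws := by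
  induction ws generalizing acc with
  | nil => simp [pvScore]
  | cons w ws ih =>
    rw [List.foldl_cons, ih]
    have hpos : pvPos.Nodup := by decide
    have hneg : pvNeg.Nodup := by decide
    have e1 := pv_sum_count_cons pvPos hpos w ws
    have e2 := pv_sum_count_cons pvNeg hneg w ws
    unfold pvScore
    rw [e1, e2]
    by_cases h1 : w ∈ pvPos
    · have h2 := pv_pos_not_neg w h1
      simp [h1, h2]; ring
    · by_cases h2 : w ∈ pvNeg <;> simp [h1, h2] <;> ring

-- ===== VERDICT (by name: the statement is the Claim_ definition above) =====
theorem sentiment_analysis_spec : Claim_equal_sentiment_analysis := by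
  intro text _
  unfold Spec_sentiment_analysis sentiment_analysis sentiment_analysis_alt
  simp only [pv_foldl_eq_score, PySem.Dict.getD_foldl_insert_add_one, PySem.Dict.getD_empty,
    zero_add, zero_add]
  unfold pvScore
  simp
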